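-- pv_equiv track=rewrite | github.com/CaioXTSY/flask-boilerplate | setup/file_utils.py | remove_function
-- ===== SOURCE A (Python) =====
-- def remove_function(content: str, decorator_or_def_contains: str) -> str:
--     """Remove a top-level or module-level function/fixture starting at the line
--     containing decorator_or_def_contains (decorator or def line).
--     Ends when a new top-level def/class is found or EOF.
--     """
--     lines = content.splitlines(keepends=True)
--     result: list[str] = []
--     removing = False
--     found_start = False
--
--     for line in lines:
--         if not found_start:
--             if decorator_or_def_contains in line:
--                 found_start = True
--                 removing = True
--                 continue
--             result.append(line)
--         else:
--             # Stop removing when we hit a new top-level function/class definition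
--             # (line starts at column 0 with def/class/@)
--             stripped = line.strip()
--             if stripped and not line[0].isspace() and (
--                 line.startswith("def ")
--                 or line.startswith("class ")
--                 or line.startswith("@")
--             ):
--                 removing = False
--                 result.append(line)
--             elif not removing:
--                 result.append(line)
--
--     # Collapse trailing blank lines at end of file
--     while result and result[-1].strip() == "":
--         result.pop()
--     if result:
--         result.append("\n")
--
--     return "".join(result)
-- ===== SOURCE B (Python) =====
-- def remove_function(content: str, decorator_or_def_contains: str) -> str:
--     """Index-based rewrite: locate the block's start and end lines, splice the
--     line list, then apply the same trailing-blank cleanup."""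
--     lines = content.splitlines(keepends=True)
--     start = next((i for i, l in enumerate(lines)
--                   if decorator_or_def_contains in l), None)
--     if start is None:
--         kept = lines
--     else:
--         tail = lines[start + 1:]
--         j = next((k for k, l in enumerate(tail)
--                   if l.startswith(("def ", "class ", "@"))), None)
--         kept = lines[:start] + ([] if j is None else tail[j:])
--     while kept and kept[-1].strip() == "":
--         kept.pop()
--     if kept:
--         kept.append("\n")
--     return "".join(kept)
-- ===== Notes on version B (the rewrite author's own statement) =====
-- stated objective: alternative
-- what changed: Replaces A's single streaming pass with found_start/removing flags by an index-based decomposition: find the start line index, find the next top-level boundary index in the suffix, splice the line list by slicing, then apply the same trailing-blank cleanup.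
import Mathlib
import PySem

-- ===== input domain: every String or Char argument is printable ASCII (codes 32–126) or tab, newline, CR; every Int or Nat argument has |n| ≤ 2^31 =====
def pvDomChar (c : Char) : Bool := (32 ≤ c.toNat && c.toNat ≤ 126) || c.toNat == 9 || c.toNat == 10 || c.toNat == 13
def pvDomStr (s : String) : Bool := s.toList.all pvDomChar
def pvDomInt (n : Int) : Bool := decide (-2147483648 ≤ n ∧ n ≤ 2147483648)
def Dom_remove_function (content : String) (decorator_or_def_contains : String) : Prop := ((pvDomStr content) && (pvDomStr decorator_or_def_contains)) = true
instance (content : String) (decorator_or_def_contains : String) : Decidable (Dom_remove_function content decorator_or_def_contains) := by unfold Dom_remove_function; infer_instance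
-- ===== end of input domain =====

-- B re-implements A's streaming flag-based scan as index-based slicing (find start, find end, splice);
-- same return value everywhere, same cost ("alternative", not faster).

-- shared helper: content.splitlines(keepends=True); exact on the Dom alphabet, where the only
-- line-break characters are '\n', '\r' and the pair '\r\n'
def pvSplitKeep : List Char → List Char → List (List Char)
  | [], acc => if acc.isEmpty then [] else [acc.reverse]
  | c :: rest, acc =>
    if c = '\n' then (acc.reverse ++ ['\n']) :: pvSplitKeep rest []
    else if c = '\r' then
      if rest.head? = some '\n' then (acc.reverse ++ ['\r', '\n']) :: pvSplitKeep rest.tail []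
      else (acc.reverse ++ ['\r']) :: pvSplitKeep rest []
    else pvSplitKeep rest (c :: acc)
termination_by s _ => s.length
decreasing_by all_goals (simp [List.length_tail]; try omega)

-- shared helper: the identical tail code of A and B —
--   while result and result[-1].strip() == "": result.pop()
--   if result: result.append("\n")
--   return "".join(result)
-- (the while-pop loop is the obvious recursion on the reversed list)
def pvDropBlankRev : List (List Char) → List (List Char)
  | [] => []
  | l :: rest => if (PySem.Chars.strip l).isEmpty then pvDropBlankRev rest else l :: rest

def pvFinish (r : List (List Char)) : String :=
  let r := (pvDropBlankRev r.reverse).reverse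
  let r := if r.isEmpty then r else r ++ [['\n']]
  String.ofList (PySem.Chars.join [] r)

-- ===== PORT A =====
-- the boolean A tests on a line once the start was found (named for readability, same steps):
--   stripped and not line[0].isspace() and (line.startswith("def ") or line.startswith("class ") or line.startswith("@"))
-- line[0] is only reached when stripped is non-empty, hence line is non-empty; the 'none' arm is unreachable
def pvCondA (line : List Char) : Bool :=
  !(PySem.Chars.strip line).isEmpty
    && !(match PySem.List.pyGet? line 0 with
         | some c => PySem.Chars.strIsspace [c]
         | none => true)
    && (PySem.Chars.startswith line "def ".toList
        || PySem.Chars.startswith line "class ".toList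
        || PySem.Chars.startswith line "@".toList)

-- one iteration of A's for-loop; state = (result, removing, found_start)
def pvStepA (dec : List Char) (st : List (List Char) × Bool × Bool) (line : List Char) :
    List (List Char) × Bool × Bool :=
  let result := st.1
  let removing := st.2.1
  let found_start := st.2.2
  if !found_start then
    if PySem.Chars.isIn dec line then (result, true, true)
    else (result ++ [line], removing, found_start)
  else
    if pvCondA line then (result ++ [line], false, found_start)
    else if !removing then (result ++ [line], removing, found_start)
    else (result, removing, found_start)

def remove_function (content : String) (decorator_or_def_contains : String) : String :=
  let lines := pvSplitKeep content.toList []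
  let st := lines.foldl (pvStepA decorator_or_def_contains.toList) ([], false, false)
  pvFinish st.1

-- ===== PORT B =====
-- l.startswith(("def ", "class ", "@"))
def pvBoundaryB (l : List Char) : Bool :=
  PySem.Chars.startswith l "def ".toList
    || PySem.Chars.startswith l "class ".toList
    || PySem.Chars.startswith l "@".toList

def remove_function_alt (content : String) (decorator_or_def_contains : String) : String :=
  let lines := pvSplitKeep content.toList []
  let kept :=
    match lines.findIdx? (fun l => PySem.Chars.isIn decorator_or_def_contains.toList l) with
    | none => lines
    | some start =>
      let tail := lines.drop (start + 1)
      match tail.findIdx? pvBoundaryB with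
      | none => lines.take start
      | some j => lines.take start ++ tail.drop j
  pvFinish kept

-- ===== PRECONDITION & SPEC =====
def Spec_remove_function (content : String) (decorator_or_def_contains : String) (out : String) : Prop := out = remove_function_alt content decorator_or_def_contains
instance (content : String) (decorator_or_def_contains : String) (out : String) : Decidable (Spec_remove_function content decorator_or_def_contains out) := by unfold Spec_remove_function; infer_instance

-- ===== CLAIM (what is proved, stated in full; the proofs are below) =====
def Claim_equal_remove_function : Prop := ∀ (content : String) (decorator_or_def_contains : String), Dom_remove_function content decorator_or_def_contains → Spec_remove_function content decorator_or_def_contains (remove_function content decorator_or_def_contains)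

-- ===== LEMMAS AND PROOFS =====

-- A's end-of-block test equals B's plain startswith test: each of the three prefixes starts with a
-- non-space character, which forces the stripped line non-empty and line[0] non-space
theorem pvCondA_eq_pvBoundaryB (line : List Char) : pvCondA line = pvBoundaryB line := by
  rcases h : pvBoundaryB line with _ | _
  · unfold pvCondA pvBoundaryB at *
    simp only [h, Bool.and_false]
  · have : ∃ c t, line = c :: t ∧ PySem.Chars.isspace c = false := by
      unfold pvBoundaryB at h
      rcases Bool.or_eq_true_iff.mp h with h' | h'
      · rcases Bool.or_eq_true_iff.mp h' with h'' | h''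
        · rcases (PySem.Chars.startswith_iff _ _).mp h'' with ⟨t, ht⟩
          exact ⟨'d', _, ht.symm, by decide⟩
        · rcases (PySem.Chars.startswith_iff _ _).mp h'' with ⟨t, ht⟩
          exact ⟨'c', _, ht.symm, by decide⟩
      · rcases (PySem.Chars.startswith_iff _ _).mp h' with ⟨t, ht⟩
        exact ⟨'@', _, ht.symm, by decide⟩
    rcases this with ⟨c, t, rfl, hc⟩
    have hstrip : (PySem.Chars.strip (c :: t)).isEmpty = false := by
      simp only [PySem.Chars.strip, PySem.Chars.lstrip, PySem.Chars.rstrip,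
        List.dropWhile_cons, hc, Bool.false_eq_true, if_false, List.isEmpty_eq_false_iff,
        ne_eq, List.reverse_eq_nil_iff, List.dropWhile_eq_nil_iff]
      intro hall
      have := hall c (by simp)
      simp [hc] at this
    unfold pvCondA
    rw [← pvBoundaryB, h, hstrip]
    simp [PySem.List.pyGet?, PySem.List.pyIdx?, PySem.Chars.strIsspace, hc]

-- once the start was found and removing stopped, A appends every remaining line
theorem foldA_phase2 (dec : List Char) (lines res : List (List Char)) :
    lines.foldl (pvStepA dec) (res, false, true) = (res ++ lines, false, true) := by
  induction lines generalizing res with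
  | nil => simp
  | cons l ls ih =>
    have hstep : pvStepA dec (res, false, true) l = (res ++ [l], false, true) := by
      simp [pvStepA]
    simp only [List.foldl_cons, hstep, ih]
    simp

-- while removing, A drops lines until the first boundary line, then appends the rest
theorem foldA_phase1 (dec : List Char) (lines res : List (List Char)) :
    lines.foldl (pvStepA dec) (res, true, true) =
      match lines.findIdx? pvBoundaryB with
      | none => (res, true, true)
      | some j => (res ++ lines.drop j, false, true) := by
  induction lines generalizing res with
  | nil => simp
  | cons l ls ih =>
    rcases hb : pvBoundaryB l with _ | _
    · have hstep : pvStepA dec (res, true, true) l = (res, true, true) := by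
        unfold pvStepA
        simp [pvCondA_eq_pvBoundaryB, hb]
      simp only [List.foldl_cons, hstep, ih, List.findIdx?_cons, hb, Bool.false_eq_true,
        if_false]
      rcases ls.findIdx? pvBoundaryB with _ | j <;> simp
    · have hstep : pvStepA dec (res, true, true) l = (res ++ [l], false, true) := by
        unfold pvStepA
        simp [pvCondA_eq_pvBoundaryB, hb]
      simp only [List.foldl_cons, hstep, foldA_phase2, List.findIdx?_cons, hb, if_true]
      simp

-- before the start is found, A copies lines; at the first line containing the pattern it switches
theorem foldA_phase0 (dec : List Char) (lines res : List (List Char)) :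
    (lines.foldl (pvStepA dec) (res, false, false)).1 =
      res ++
      (match lines.findIdx? (fun l => PySem.Chars.isIn dec l) with
       | none => lines
       | some i =>
         match (lines.drop (i + 1)).findIdx? pvBoundaryB with
         | none => lines.take i
         | some j => lines.take i ++ (lines.drop (i + 1)).drop j) := by
  induction lines generalizing res with
  | nil => simp
  | cons l ls ih =>
    rcases hm : PySem.Chars.isIn dec l with _ | _
    · have hstep : pvStepA dec (res, false, false) l = (res ++ [l], false, false) := by
        unfold pvStepA; simp [hm]
      simp only [List.foldl_cons, hstep, ih, List.findIdx?_cons, hm, Bool.false_eq_true,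
        if_false]
      rcases ls.findIdx? (fun l => PySem.Chars.isIn dec l) with _ | i
      · simp
      · simp only [Option.map_some, List.drop_succ_cons, List.take_succ_cons]
        rcases (ls.drop (i + 1)).findIdx? pvBoundaryB with _ | j <;> simp
    · have hstep : pvStepA dec (res, false, false) l = (res, true, true) := by
        unfold pvStepA; simp [hm]
      simp only [List.foldl_cons, hstep, foldA_phase1, List.findIdx?_cons, hm, if_true]
      rcases hj : ls.findIdx? pvBoundaryB with _ | j <;> simp [hj]

-- ===== VERDICT (by name: the statement is the Claim_ definition above) =====
theorem remove_function_spec : Claim_equal_remove_function := by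
  intro content dec _
  unfold Spec_remove_function remove_function remove_function_alt
  simp only []
  rw [foldA_phase0]
  simp only [List.nil_append]
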